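-- pv_equiv track=rewrite | github.com/Manampisoalandry/WriteUp_CyberCup-2nd-edition_CCOI2026 | Oeil du cyclone/Source_File/solve.py | lagrange_coeffs
-- ===== SOURCE A (Python) =====
-- p = 2**521 - 1
--
-- def lagrange_coeffs(xpoints, x):
--     """Retourne [L_i(x)] pour la base de Lagrange sur xpoints."""
--     coeffs = []
--     for i, xi in enumerate(xpoints):
--         num = 1
--         den = 1
--         for j, xj in enumerate(xpoints):
--             if j == i:
--                 continue
--             num = (num * (x - xj)) % p
--             den = (den * (xi - xj)) % p
--         coeffs.append((num * pow(den, -1, p)) % p)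
--     return coeffs
-- ===== SOURCE B (Python) =====
-- p = 2**521 - 1
--
-- def lagrange_coeffs(xpoints, x):
--     """Retourne [L_i(x)] pour la base de Lagrange sur xpoints."""
--     pre = [1]
--     acc = 1
--     for xi in xpoints:
--         acc = acc * (x - xi) % p
--         pre.append(acc)
--     suf = [1]
--     acc = 1
--     for xi in reversed(xpoints):
--         acc = acc * (x - xi) % p
--         suf.append(acc)
--     suf.reverse()
--     coeffs = []
--     for i, xi in enumerate(xpoints):
--         den = 1
--         for xj in xpoints[:i] + xpoints[i + 1:]:
--             den = den * (xi - xj) % p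
--         coeffs.append(pre[i] * suf[i + 1] % p * pow(den, -1, p) % p)
--     return coeffs
-- ===== Notes on version B (the rewrite author's own statement) =====
-- stated objective: alternative
-- what changed: B precomputes prefix and suffix products of (x - xj) mod p in two linear passes so each numerator is one multiplication instead of an O(n) scan, and iterates the denominator over the two slices around i instead of an enumerate loop with an index-skip branch.
import Mathlib
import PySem

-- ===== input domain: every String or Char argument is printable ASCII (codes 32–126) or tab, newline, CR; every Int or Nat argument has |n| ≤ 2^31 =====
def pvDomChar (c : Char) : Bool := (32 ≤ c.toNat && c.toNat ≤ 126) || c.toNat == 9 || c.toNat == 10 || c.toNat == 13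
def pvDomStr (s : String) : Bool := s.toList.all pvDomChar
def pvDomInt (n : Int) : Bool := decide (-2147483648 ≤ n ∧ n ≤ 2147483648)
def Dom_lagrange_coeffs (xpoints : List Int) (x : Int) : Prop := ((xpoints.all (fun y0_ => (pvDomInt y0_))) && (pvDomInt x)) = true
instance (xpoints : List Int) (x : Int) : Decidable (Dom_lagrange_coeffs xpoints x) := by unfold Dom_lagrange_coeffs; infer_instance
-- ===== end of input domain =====

-- B computes all numerators with one prefix-product and one suffix-product pass (O(n) multiplications
-- instead of O(n^2) for the numerators) and drops the index-skip branch from the denominator loop;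
-- same return value as A wherever A returns (Pre_ excludes repeated nodes, where pow(den,-1,p) raises).

-- the module constant p = 2**521 - 1
def pvP : Int := 2 ^ 521 - 1

-- hand port of Python's pow(b, -1, m) via extended Euclid; exact for m > 0:
-- some v = the inverse in [0, m), none exactly where Python raises ValueError (base not invertible)
def pvEgcd : Nat → Nat → Int × Int × Nat
  | 0, b => (0, 1, b)
  | (a+1), b =>
      let r := pvEgcd (b % (a+1)) (a+1)
      (r.2.1 - ((b / (a+1) : Nat) : Int) * r.1, r.1, r.2.2)
  termination_by a _ => a
  decreasing_by exact Nat.mod_lt b (Nat.succ_pos a)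

def pvInvMod? (b m : Int) : Option Int :=
  let r := pvEgcd (PySem.Int.mod b m).toNat m.toNat
  if r.2.2 = 1 then some (PySem.Int.mod r.1 m) else none

-- ===== PORT A =====
-- (pvInvMod? … = none only where Python's pow raises; excluded by Pre_, so the .getD 0 default is unreachable there)
def lagrange_coeffs (xpoints : List Int) (x : Int) : List Int :=
  (PySem.List.enumerate xpoints).foldl (fun coeffs ixi =>
    let nd := (PySem.List.enumerate xpoints).foldl
      (fun (nd : Int × Int) jxj =>
        if jxj.1 = ixi.1 then nd
        else (PySem.Int.mod (nd.1 * (x - jxj.2)) pvP,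
              PySem.Int.mod (nd.2 * (ixi.2 - jxj.2)) pvP)) (1, 1)
    coeffs ++ [PySem.Int.mod (nd.1 * ((pvInvMod? nd.2 pvP).getD 0)) pvP]) []

-- ===== PORT B =====
def lagrange_coeffs_alt (xpoints : List Int) (x : Int) : List Int :=
  let pre := (xpoints.foldl (fun (st : List Int × Int) xi =>
      let a := PySem.Int.mod (st.2 * (x - xi)) pvP
      (st.1 ++ [a], a)) ([1], 1)).1
  let suf := (xpoints.reverse.foldl (fun (st : List Int × Int) xi =>
      let a := PySem.Int.mod (st.2 * (x - xi)) pvP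
      (st.1 ++ [a], a)) ([1], 1)).1.reverse
  (PySem.List.enumerate xpoints).foldl (fun coeffs ixi =>
    let den := (PySem.List.slice xpoints none (some ixi.1) ++
                PySem.List.slice xpoints (some (ixi.1 + 1)) none).foldl
      (fun d xj => PySem.Int.mod (d * (ixi.2 - xj)) pvP) 1
    coeffs ++ [PySem.Int.mod
      (PySem.Int.mod (PySem.List.pyGetD pre ixi.1 0 * PySem.List.pyGetD suf (ixi.1 + 1) 0) pvP *
        ((pvInvMod? den pvP).getD 0)) pvP]) []

-- ===== PRECONDITION & SPEC =====
-- Pre_ excludes lists with a repeated node: there A's pow(den, -1, p) raises ValueError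
-- (within Dom, |xi| ≤ 2^31 < p, so nodes are distinct mod p iff distinct as integers).
def Pre_lagrange_coeffs (xpoints : List Int) (x : Int) : Prop := xpoints.Pairwise (· ≠ ·)
instance (xpoints : List Int) (x : Int) : Decidable (Pre_lagrange_coeffs xpoints x) := by unfold Pre_lagrange_coeffs; infer_instance
def pvWitness_lagrange_coeffs : List Int × Int := ([0, 1, 2], 5)
def Spec_lagrange_coeffs (xpoints : List Int) (x : Int) (out : List Int) : Prop := out = lagrange_coeffs_alt xpoints x
instance (xpoints : List Int) (x : Int) (out : List Int) : Decidable (Spec_lagrange_coeffs xpoints x out) := by unfold Spec_lagrange_coeffs; infer_instance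

-- ===== CLAIM (what is proved, stated in full; the proofs are below) =====
def Claim_equal_lagrange_coeffs : Prop := ∀ (xpoints : List Int) (x : Int), Dom_lagrange_coeffs xpoints x → Pre_lagrange_coeffs xpoints x → Spec_lagrange_coeffs xpoints x (lagrange_coeffs xpoints x)

-- ===== LEMMAS AND PROOFS =====

set_option maxRecDepth 8192 in
theorem pvP_pos : (0 : Int) < pvP := by unfold pvP; decide

set_option maxRecDepth 8192 in
theorem one_lt_pvP : (1 : Int) < pvP := by unfold pvP; decide

theorem one_emod_pvP : (1 : Int) % pvP = 1 :=
  Int.emod_eq_of_lt (by norm_num) one_lt_pvP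

-- the per-element value A appends (zeta-expanded body of A's outer loop)
def gA (xs : List Int) (x : Int) (ixi : Int × Int) : Int :=
  let nd := (PySem.List.enumerate xs).foldl
    (fun (nd : Int × Int) jxj =>
      if jxj.1 = ixi.1 then nd
      else (PySem.Int.mod (nd.1 * (x - jxj.2)) pvP,
            PySem.Int.mod (nd.2 * (ixi.2 - jxj.2)) pvP)) (1, 1)
  PySem.Int.mod (nd.1 * ((pvInvMod? nd.2 pvP).getD 0)) pvP

-- the per-element value B appends, with pre/suf as B builds them
def gB (xs : List Int) (x : Int) (pre suf : List Int) (ixi : Int × Int) : Int :=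
  let den := (PySem.List.slice xs none (some ixi.1) ++
              PySem.List.slice xs (some (ixi.1 + 1)) none).foldl
    (fun d xj => PySem.Int.mod (d * (ixi.2 - xj)) pvP) 1
  PySem.Int.mod
    (PySem.Int.mod (PySem.List.pyGetD pre ixi.1 0 * PySem.List.pyGetD suf (ixi.1 + 1) 0) pvP *
      ((pvInvMod? den pvP).getD 0)) pvP

def pvScan (x : Int) (l : List Int) : List Int × Int :=
  l.foldl (fun (st : List Int × Int) xi =>
    let a := PySem.Int.mod (st.2 * (x - xi)) pvP
    (st.1 ++ [a], a)) ([1], 1)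

theorem A_as_map (xs : List Int) (x : Int) :
    lagrange_coeffs xs x = (PySem.List.enumerate xs).map (gA xs x) := by
  show (PySem.List.enumerate xs).foldl (fun acc ixi => acc ++ [gA xs x ixi]) [] = _
  rw [PySem.List.foldl_append_singleton_eq_map, List.nil_append]

theorem B_as_map (xs : List Int) (x : Int) :
    lagrange_coeffs_alt xs x =
      (PySem.List.enumerate xs).map (gB xs x (pvScan x xs).1 (pvScan x xs.reverse).1.reverse) := by
  show (PySem.List.enumerate xs).foldl
      (fun acc ixi => acc ++ [gB xs x (pvScan x xs).1 (pvScan x xs.reverse).1.reverse ixi]) [] = _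
  rw [PySem.List.foldl_append_singleton_eq_map, List.nil_append]

-- running (·*(c-y)) % p fold computes the product mod p
theorem emod_mul_left (a b : Int) : (a % pvP * b) % pvP = (a * b) % pvP := by
  rw [Int.mul_emod, Int.emod_emod_of_dvd _ dvd_rfl, ← Int.mul_emod]

theorem foldmul (c : Int) (l : List Int) (s : Int) :
    l.foldl (fun a y => (a * (c - y)) % pvP) (s % pvP) = (s * (l.map (c - ·)).prod) % pvP := by
  induction l generalizing s with
  | nil => simp
  | cons y t ih =>
      simp only [List.foldl_cons, List.map_cons, List.prod_cons]
      rw [emod_mul_left, ih (s * (c - y))]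
      ring_nf

theorem foldmul1 (c : Int) (l : List Int) :
    l.foldl (fun a y => (a * (c - y)) % pvP) 1 = (l.map (c - ·)).prod % pvP := by
  have h := foldmul c l 1
  rw [one_emod_pvP] at h
  simpa using h

-- a product-pair fold splits into two independent folds
theorem pair_fold (c xi : Int) (l : List Int) (a b : Int) :
    l.foldl (fun (nd : Int × Int) y =>
        ((nd.1 * (c - y)) % pvP, (nd.2 * (xi - y)) % pvP)) (a, b)
      = (l.foldl (fun v y => (v * (c - y)) % pvP) a,
         l.foldl (fun v y => (v * (xi - y)) % pvP) b) := by
  induction l generalizing a b with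
  | nil => rfl
  | cons y t ih => simp only [List.foldl_cons]; exact ih _ _

-- the scan builds the list of prefix products mod p
theorem scan_spec (c : Int) (l : List Int) :
    pvScan c l = ((List.range (l.length + 1)).map
        (fun j => ((l.take j).map (c - ·)).prod % pvP),
      (l.map (c - ·)).prod % pvP) := by
  induction l using List.reverseRecOn with
  | nil => simp [pvScan, one_emod_pvP]
  | append_singleton t y ih =>
      unfold pvScan at ih ⊢
      rw [List.foldl_append, ih]
      simp only [List.foldl_cons, List.foldl_nil, PySem.Int.mod_eq_emod_of_pos pvP_pos,
        Prod.mk.injEq]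
      refine ⟨?_, ?_⟩
      · conv_rhs => rw [show (t ++ [y]).length + 1 = (t.length + 1) + 1 by simp,
          List.range_succ, List.map_append]
        congr 1
        · apply List.map_congr_left
          intro j hj
          rw [List.take_append_of_le_length (Nat.lt_succ_iff.mp (List.mem_range.mp hj))]
        · simp only [List.map_cons, List.map_nil]
          rw [List.take_of_length_le (by simp), emod_mul_left]
          simp [List.map_append]
      · rw [emod_mul_left]
        simp [List.map_append]


-- skip-at-k fold over enumerate equals the plain fold when index k never occurs
theorem skip_fold2 (x xi : Int) (l : List Int) (s k : Int) (st : Int × Int)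
    (h : ∀ p ∈ PySem.List.enumerate l s, p.1 ≠ k) :
    (PySem.List.enumerate l s).foldl
      (fun (nd : Int × Int) jxj => if jxj.1 = k then nd
        else ((nd.1 * (x - jxj.2)) % pvP, (nd.2 * (xi - jxj.2)) % pvP)) st
    = l.foldl (fun (nd : Int × Int) y =>
        ((nd.1 * (x - y)) % pvP, (nd.2 * (xi - y)) % pvP)) st := by
  induction l generalizing s st with
  | nil => simp [PySem.List.enumerate_nil]
  | cons y t ih =>
      rw [PySem.List.enumerate_cons]
      simp only [List.foldl_cons]
      rw [if_neg (h (s, y) (by rw [PySem.List.enumerate_cons]; exact List.mem_cons_self))]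
      exact ih _ _ (fun p hp => h p (by rw [PySem.List.enumerate_cons]; exact List.mem_cons_of_mem _ hp))

-- A's inner loop on index k: numerator is the product mod p over the other nodes,
-- denominator is the plain fold over the other nodes
theorem A_inner (xs : List Int) (x xi : Int) (k : Nat) (hk : k < xs.length) :
    (PySem.List.enumerate xs).foldl
      (fun (nd : Int × Int) jxj => if jxj.1 = (k : Int) then nd
        else ((nd.1 * (x - jxj.2)) % pvP, (nd.2 * (xi - jxj.2)) % pvP)) (1, 1)
    = (((xs.take k ++ xs.drop (k+1)).map (x - ·)).prod % pvP,
       (xs.take k ++ xs.drop (k+1)).foldl (fun v y => (v * (xi - y)) % pvP) 1) := by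
  have htk : (xs.take k).length = k := by simp [List.length_take]; omega
  conv_lhs => rw [show xs = xs.take k ++ xs[k] :: xs.drop (k+1) by
    conv_lhs => rw [← List.take_append_drop k xs, List.drop_eq_getElem_cons hk]]
  rw [PySem.List.enumerate_append, List.foldl_append]
  rw [skip_fold2 x xi _ 0 _ _ (by
    intro p hp
    obtain ⟨j, hj, rfl⟩ := (PySem.List.mem_enumerate_iff _ _ _).mp hp
    rw [htk] at hj
    omega)]
  rw [PySem.List.enumerate_cons, List.foldl_cons]
  rw [if_pos (by rw [htk]; simp)]
  rw [skip_fold2 x xi _ _ _ _ (by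
    intro p hp
    obtain ⟨j, hj, rfl⟩ := (PySem.List.mem_enumerate_iff _ _ _).mp hp
    rw [htk]
    omega)]
  rw [← List.foldl_append, pair_fold, foldmul1]

theorem elem_eq (xs : List Int) (x : Int) (k : Nat) (hk : k < xs.length) :
    gA xs x ((k : Int), xs[k]) =
      gB xs x (pvScan x xs).1 (pvScan x xs.reverse).1.reverse ((k : Int), xs[k]) := by
  simp only [gA, gB, PySem.Int.mod_eq_emod_of_pos pvP_pos]
  rw [A_inner xs x xs[k] k hk]
  rw [show ((k : Int) + 1) = ((k + 1 : Nat) : Int) by push_cast; ring]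
  rw [PySem.List.slice_to_natCast, PySem.List.slice_from_natCast]
  rw [scan_spec x xs, scan_spec x xs.reverse]
  dsimp only
  rw [PySem.List.pyGetD_natCast, PySem.List.pyGetD_natCast]
  rw [PySem.List.getD_map_range _ _ _ _ (by omega)]
  rw [List.getD_eq_getElem _ _ (by simp; omega)]
  rw [List.getElem_reverse, List.getElem_map, List.getElem_range]
  rw [List.take_reverse]
  rw [show xs.length -
        ((List.map (fun j => (List.map (fun x_1 => x - x_1) (List.take j xs.reverse)).prod % pvP)
            (List.range (xs.reverse.length + 1))).length - 1 - (k + 1)) = k + 1 by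
    simp; omega]
  rw [List.map_reverse, List.prod_reverse]
  rw [List.map_append, List.prod_append]
  rw [emod_mul_left, ← Int.mul_emod, emod_mul_left]

-- ===== VERDICT (by name: the statement is the Claim_ definition above) =====
theorem lagrange_coeffs_spec : Claim_equal_lagrange_coeffs := by
  intro xs x _ _
  unfold Spec_lagrange_coeffs
  rw [A_as_map, B_as_map]
  apply List.map_congr_left
  intro ixi hixi
  obtain ⟨k, hk, rfl⟩ := (PySem.List.mem_enumerate_iff _ _ _).mp hixi
  rw [show ((0 : Int) + (k : Int), xs[k]) = ((k : Int), xs[k]) by norm_num]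
  exact elem_eq xs x k hk
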